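-- pv_equiv track=rewrite | github.com/AkshDesai04/Open-ATS | data_retrieval.py | personal_information
-- ===== SOURCE A (Python) =====
-- def personal_information(resume):
--     # Extract the 'info' string from the dictionary
--     info_str = resume.get('info', '')
--
--     # Split the input string into lines
--     lines = info_str.split('\n')
--
--     # Initialize variables to store the extracted values
--     name = ''
--     location = ''
--     email = ''
--     phone_number = ''
--
--     # Iterate through the lines to find the required information
--     for line in lines:
--         if ' ' in line:
--             # Find the name (first line)
--             if not name:
--                 name = line
--             # Find the location (line starts with 'location')
--             elif line.startswith('location'):
--                 location = line.replace('location ', '', 1)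
--             # Find the email (line starts with 'email')
--             elif line.startswith('email'):
--                 email = line.replace('email ', '', 1)
--             # Find the phone number (line starts with 'mobile')
--             elif line.startswith('mobile'):
--                 phone_number = line.replace('mobile ', '', 1)
--
--     return name, location, email, phone_number
-- ===== SOURCE B (Python) =====
-- def personal_information(resume):
--     # One filtering pass picks the lines that contain a space; the first is the
--     # name, and each field is the last remaining line with its prefix.
--     spaced = [ln for ln in resume.get('info', '').split('\n') if ' ' in ln]
--     name, rest = (spaced[0], spaced[1:]) if spaced else ('', [])
--
--     def field(prefix):
--         matches = [ln for ln in rest if ln.startswith(prefix)]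
--         return matches[-1].replace(prefix + ' ', '', 1) if matches else ''
--
--     return name, field('location'), field('email'), field('mobile')
-- ===== Notes on version B (the rewrite author's own statement) =====
-- stated objective: alternative
-- what changed: Replaces A's single-pass four-variable state machine with a declarative decomposition: filter the space-containing lines once, take the head as the name, and extract each field as the last remaining line with its prefix (last match wins, as in A).
import Mathlib
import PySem

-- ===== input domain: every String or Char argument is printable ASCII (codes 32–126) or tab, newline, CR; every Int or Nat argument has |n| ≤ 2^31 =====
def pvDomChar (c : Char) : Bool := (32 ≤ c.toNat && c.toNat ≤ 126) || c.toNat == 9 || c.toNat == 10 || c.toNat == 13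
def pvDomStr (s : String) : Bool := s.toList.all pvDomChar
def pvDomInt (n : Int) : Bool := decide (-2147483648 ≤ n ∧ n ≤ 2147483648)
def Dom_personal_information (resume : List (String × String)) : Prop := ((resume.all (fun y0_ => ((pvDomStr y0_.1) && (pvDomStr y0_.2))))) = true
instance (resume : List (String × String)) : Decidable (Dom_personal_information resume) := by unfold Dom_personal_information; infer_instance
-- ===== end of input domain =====

-- B replaces A's single-pass four-accumulator state machine by filter-the-spaced-lines,
-- head = name, and per-field "last line with this prefix" passes (alternative decomposition, same cost).


-- s.replace(old, '', 1) for a nonempty `old` (exact there: removes the first occurrence, if any)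
def replace1 (s old : String) : String :=
  let cs := s.toList
  let o := old.toList
  let i := PySem.Chars.find cs o
  if i = -1 then s else String.ofList (cs.take i.toNat ++ cs.drop (i.toNat + o.length))

-- ===== PORT A =====
-- A's per-line update of the four accumulators (the body of A's for-loop)
def piStepA (st : String × String × String × String) (line : String) :
    String × String × String × String :=
  let (name, location, email, phone) := st
  if PySem.Str.isIn " " line then
    if name == "" then (line, location, email, phone)
    else if PySem.Str.startswith line "location" then
      (name, replace1 line "location ", email, phone)
    else if PySem.Str.startswith line "email" then
      (name, location, replace1 line "email ", phone)
    else if PySem.Str.startswith line "mobile" then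
      (name, location, email, replace1 line "mobile ")
    else st
  else st

def personal_information (resume : List (String × String)) : String × String × String × String :=
  let info_str := (PySem.Dict.ofList resume).getD "info" ""
  let lines := (PySem.Str.split? info_str "\n").getD []   -- sep ≠ "", so split? is `some`
  lines.foldl piStepA ("", "", "", "")

-- ===== PORT B =====
-- B's field(prefix): the last line of `rest` starting with `prefix`, transformed
-- (matches[-1] on a nonempty list is its last element; '' if matches is empty)
def piField (rest : List String) (prefix_ : String) : String :=
  (((rest.filter (fun ln => PySem.Str.startswith ln prefix_)).getLast?).map
      (fun m => replace1 m (prefix_ ++ " "))).getD ""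

def personal_information_alt (resume : List (String × String)) : String × String × String × String :=
  let spaced := (((PySem.Str.split? ((PySem.Dict.ofList resume).getD "info" "") "\n").getD []).filter
      (fun ln => PySem.Str.isIn " " ln))
  let name := spaced.headD ""
  let rest := spaced.drop 1
  (name, piField rest "location", piField rest "email", piField rest "mobile")

-- ===== PRECONDITION & SPEC =====
def Spec_personal_information (resume : List (String × String)) (out : String × String × String × String) : Prop := out = personal_information_alt resume
instance (resume : List (String × String)) (out : String × String × String × String) : Decidable (Spec_personal_information resume out) := by unfold Spec_personal_information; infer_instance

-- ===== CLAIM (what is proved, stated in full; the proofs are below) =====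
def Claim_equal_personal_information : Prop := ∀ (resume : List (String × String)), Dom_personal_information resume → Spec_personal_information resume (personal_information resume)

-- ===== LEMMAS AND PROOFS =====

-- field extractor as a left fold over raw lines with a default accumulator
def piF (pre : String) (xs : List String) (d : String) : String :=
  xs.foldl
    (fun acc x =>
      if PySem.Str.isIn " " x then
        (if PySem.Str.startswith x pre then replace1 x (pre ++ " ") else acc)
      else acc) d

-- "last filtered match, else default" is a left fold
theorem lastD_eq_foldl {α β : Type} (q : α → Bool) (f : α → β) (xs : List α) (d : β) :
    (((xs.filter q).getLast?).map f).getD d =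
      xs.foldl (fun acc x => if q x then f x else acc) d := by
  induction xs using List.reverseRecOn generalizing d with
  | nil => rfl
  | append_singleton ys y ih =>
    rw [List.filter_append, List.foldl_append]
    by_cases h : q y = true
    · simp [h]
    · have h' : q y = false := by cases hq : q y with
        | true => exact absurd hq h
        | false => rfl
      rw [show List.filter q [y] = [] by simp [h'], List.append_nil, ih d]
      simp [h']

theorem prefix_head {p q s : List Char} (hp : p <+: s) (hq : q <+: s)
    (hpn : p ≠ []) (hqn : q ≠ []) : p.head? = q.head? := by
  obtain ⟨t, rfl⟩ := hp
  obtain ⟨u, hu⟩ := hq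
  cases p with
  | nil => exact absurd rfl hpn
  | cons a p' =>
    cases q with
    | nil => exact absurd rfl hqn
    | cons b q' =>
      simp only [List.cons_append] at hu
      have : b = a := by simpa using congrArg List.head? hu
      simp [this]

-- two of A's prefixes never both match (their first characters differ)
theorem not_both (s : List Char) (p q : List Char)
    (hne : p.head? ≠ q.head?) (hpn : p ≠ []) (hqn : q ≠ [])
    (h : PySem.Chars.startswith s p = true) : PySem.Chars.startswith s q = false := by
  cases hx : PySem.Chars.startswith s q with
  | false => rfl
  | true =>
    have h1 : p <+: s := (PySem.Chars.startswith_iff s p).mp h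
    have h2 : q <+: s := (PySem.Chars.startswith_iff s q).mp hx
    exact absurd (prefix_head h1 h2 hpn hqn) hne

-- a line that contains a space is nonempty
theorem spaced_ne_empty (line : String) (h : PySem.Str.isIn " " line = true) :
    (line == "") = false := by
  cases hx : (line == "") with
  | false => rfl
  | true =>
    have hl : line = "" := by simpa using hx
    subst hl
    have : (" ".toList : List Char) <:+: ("".toList : List Char) :=
      (PySem.Str.isIn_iff_infix " " "").mp h
    simp at this

-- A's fold, once the name is set, computes the three last-match field extractors
theorem foldA_named (lines : List String) (n l e p : String) (hn : (n == "") = false) :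
    lines.foldl piStepA (n, l, e, p) =
      (n, piF "location" lines l, piF "email" lines e, piF "mobile" lines p) := by
  induction lines generalizing l e p with
  | nil => rfl
  | cons x xs ih =>
    by_cases hsp : PySem.Str.isIn " " x = true
    · simp at hsp
      by_cases hloc : PySem.Str.startswith x "location" = true
      · simp at hloc
        have he := not_both x.toList "location".toList "email".toList (by decide) (by decide) (by decide) hloc
        have hm := not_both x.toList "location".toList "mobile".toList (by decide) (by decide) (by decide) hloc
        simp at he hm
        simp [piStepA, piF, hsp, hn, hloc, he, hm, ih]
      · simp at hloc
        by_cases hem : PySem.Str.startswith x "email" = true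
        · simp at hem
          have hm := not_both x.toList "email".toList "mobile".toList (by decide) (by decide) (by decide) hem
          simp at hm
          simp [piStepA, piF, hsp, hn, hloc, hem, hm, ih]
        · simp at hem
          by_cases hmo : PySem.Str.startswith x "mobile" = true
          · simp at hmo
            simp [piStepA, piF, hsp, hn, hloc, hem, hmo, ih]
          · simp at hmo
            simp [piStepA, piF, hsp, hn, hloc, hem, hmo, ih]
    · simp at hsp
      simp [piStepA, piF, hsp, ih]

-- B's piField over the spaced tail equals the fold piF over the raw tail
theorem piField_eq_piF (pre : String) (xs : List String) :
    piField (xs.filter (fun ln => PySem.Str.isIn " " ln)) pre = piF pre xs "" := by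
  unfold piField
  rw [lastD_eq_foldl, List.foldl_filter]
  unfold piF
  rfl

-- A's full fold from the initial all-empty state, characterized by the spaced lines
theorem foldA_start (lines : List String) :
    lines.foldl piStepA ("", "", "", "") =
      (((lines.filter (fun ln => PySem.Str.isIn " " ln)).headD ""),
       piField ((lines.filter (fun ln => PySem.Str.isIn " " ln)).drop 1) "location",
       piField ((lines.filter (fun ln => PySem.Str.isIn " " ln)).drop 1) "email",
       piField ((lines.filter (fun ln => PySem.Str.isIn " " ln)).drop 1) "mobile") := by
  induction lines with
  | nil => rfl
  | cons x xs ih =>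
    by_cases hsp : PySem.Str.isIn " " x = true
    · have hx : (x == "") = false := spaced_ne_empty x hsp
      have hstep : piStepA ("", "", "", "") x = (x, "", "", "") := by
        simp at hsp
        simp [piStepA, hsp]
      rw [List.foldl_cons, hstep, foldA_named xs x "" "" "" hx]
      have hfilter : (x :: xs).filter (fun ln => PySem.Str.isIn " " ln) =
          x :: xs.filter (fun ln => PySem.Str.isIn " " ln) := by
        rw [List.filter_cons, if_pos hsp]
      rw [hfilter]
      simp only [List.drop_succ_cons, List.drop_zero]
      rw [piField_eq_piF, piField_eq_piF, piField_eq_piF]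
      rfl
    · have hsp' : PySem.Str.isIn " " x = false := by
        cases hq : PySem.Str.isIn " " x with
        | true => exact absurd hq hsp
        | false => rfl
      have hstep : piStepA ("", "", "", "") x = ("", "", "", "") := by
        simp at hsp'
        simp [piStepA, hsp']
      rw [List.foldl_cons, hstep, ih]
      have hfilter : (x :: xs).filter (fun ln => PySem.Str.isIn " " ln) =
          xs.filter (fun ln => PySem.Str.isIn " " ln) := by
        have hspC : PySem.Chars.isIn [' '] x.toList = false := by simpa using hsp'
        rw [List.filter_cons, if_neg (by simp [hspC])]
      rw [hfilter]

-- ===== VERDICT (by name: the statement is the Claim_ definition above) =====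
theorem personal_information_spec : Claim_equal_personal_information := by
  intro resume _
  unfold Spec_personal_information personal_information personal_information_alt
  exact foldA_start _
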